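-- pv_equiv track=rewrite | github.com/hyoungjook/gpudiag | tests/icache_hierarchy.py | parse_dumpfile_line_hsaco
-- ===== SOURCE A (Python) =====
-- def parse_dumpfile_line_hsaco(line):
--     if line.find('//') < 0:
--         return ('', 0) # no instruction
--     tokens = line.split(' ')
--     inst = -1 ; addr = -1
--     for i in range(len(tokens)):
--         if tokens[i] != '':
--             if inst == -1:
--                 inst = tokens[i]
--             elif tokens[i] == '//':
--                 addr = int(tokens[i+1].replace(':',''), 16)
--     return (inst, addr)
-- ===== SOURCE B (Python) =====
-- def parse_dumpfile_line_hsaco(line):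
--     if '//' not in line:
--         return ('', 0)
--     # single character-level scan: hand-rolled tokenizer state machine, no split()
--     inst = -1
--     addr = -1
--     capture = False   # previous finished token was a '//' marker after the instruction
--     cur = ''
--     for ch in line + ' ':          # sentinel space finishes the last token
--         if ch == ' ':
--             if capture:
--                 addr = int(cur.replace(':', ''), 16)
--                 capture = False
--             if cur != '':
--                 if inst == -1:
--                     inst = cur
--                 elif cur == '//':
--                     capture = True
--             cur = ''
--         else:
--             cur = cur + ch
--     return (inst, addr)
-- ===== Notes on version B (the rewrite author's own statement) =====
-- stated objective: alternative
-- what changed: A splits the line into a token list and runs an indexed loop with tokens[i+1] lookahead; B never calls split() and builds no token list: it makes one character-level pass over the raw line with a hand-rolled tokenizer state machine (current-token buffer plus a capture flag that parses the token following a '//' marker).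
import Mathlib
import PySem

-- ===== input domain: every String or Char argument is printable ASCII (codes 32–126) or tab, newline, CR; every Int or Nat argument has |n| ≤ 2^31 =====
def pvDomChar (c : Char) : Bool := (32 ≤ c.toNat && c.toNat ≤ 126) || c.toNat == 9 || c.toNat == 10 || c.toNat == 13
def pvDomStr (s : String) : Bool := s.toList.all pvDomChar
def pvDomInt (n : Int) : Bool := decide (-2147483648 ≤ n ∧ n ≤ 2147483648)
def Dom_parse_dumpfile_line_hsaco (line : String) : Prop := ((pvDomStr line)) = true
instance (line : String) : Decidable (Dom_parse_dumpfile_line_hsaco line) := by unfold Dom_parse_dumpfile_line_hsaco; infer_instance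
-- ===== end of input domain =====

-- B replaces A's split-then-indexed-loop by a single character-level tokenizer state machine over the
-- raw line (no split(), no token list, no index arithmetic); alternative decomposition, no speed claim.

-- int(s.replace(':',''), 16) — shared subexpression of both sources; none exactly where Python raises
def pvParse (s : String) : Option Int :=
  PySem.Int.ofStrBase? (PySem.Str.replace s ":" "") 16

-- int(tokens[i+1].replace(':',''), 16) as A computes it; none exactly where Python raises
def pvHexAt (tokens : List String) (i : Int) : Option Int :=
  (PySem.List.pyGet? tokens (i + 1)).bind pvParse

-- ===== PORT A =====
def parse_dumpfile_line_hsaco (line : String) : String × Int :=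
  if PySem.Str.find line "//" < 0 then ("", 0)
  else
    let tokens := (PySem.Str.split? line " ").getD []   -- line.split(' '); sep ≠ '' never raises
    -- inst : Option String models the int/str sentinel `inst = -1`; where Python would raise, the
    -- total form keeps addr unchanged (those inputs are outside Pre_)
    let st := (PySem.List.pyRange 0 (PySem.List.len tokens) 1).foldl
      (fun (st : Option String × Int) i =>
        if PySem.List.pyGetD tokens i "" != "" then
          if st.1 = none then (some (PySem.List.pyGetD tokens i ""), st.2)
          else if PySem.List.pyGetD tokens i "" = "//" then (st.1, (pvHexAt tokens i).getD st.2)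
          else st
        else st) (none, -1)
    (st.1.getD "", st.2)

-- ===== PORT B =====
-- one step of B's character machine: state = (inst sentinel, addr, capture flag, current token)
def pvCharStep (st : Option String × Int × Bool × String) (ch : Char) :
    Option String × Int × Bool × String :=
  match st with
  | (inst, addr, cap, cur) =>
    if ch = ' ' then
      let addr1 := if cap then (pvParse cur).getD addr else addr
      if cur != "" then
        if inst = none then (some cur, addr1, false, "")
        else if cur = "//" then (inst, addr1, true, "")
        else (inst, addr1, false, "")
      else (inst, addr1, false, "")
    else (inst, addr, cap, cur.push ch)

def parse_dumpfile_line_hsaco_alt (line : String) : String × Int :=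
  if PySem.Str.isIn "//" line = false then ("", 0)
  else
    -- `for ch in line + ' ':` — iterate the characters of line plus a sentinel space
    let st := (line.toList ++ [' ']).foldl pvCharStep (none, -1, false, "")
    (st.1.getD "", st.2.1)

-- ===== PRECONDITION & SPEC =====
-- Pre_ excludes exactly the lines on which A raises (IndexError/ValueError): a standalone '//' token
-- after the first nonempty token that is last on the line or not followed by a valid hex token.
def Pre_parse_dumpfile_line_hsaco (line : String) : Prop :=
  PySem.Str.find line "//" < 0 ∨
  ∀ p ∈ ((PySem.List.enumerate ((PySem.Str.split? line " ").getD [])).filter (fun p => p.2 != "")).tail,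
    p.2 = "//" → (pvHexAt ((PySem.Str.split? line " ").getD []) p.1).isSome
instance (line : String) : Decidable (Pre_parse_dumpfile_line_hsaco line) := by
  unfold Pre_parse_dumpfile_line_hsaco; infer_instance

def pvWitness_parse_dumpfile_line_hsaco : String := "s_add v0  // 00001f: data"

def Spec_parse_dumpfile_line_hsaco (line : String) (out : String × Int) : Prop := out = parse_dumpfile_line_hsaco_alt line
instance (line : String) (out : String × Int) : Decidable (Spec_parse_dumpfile_line_hsaco line out) := by unfold Spec_parse_dumpfile_line_hsaco; infer_instance

-- ===== CLAIM (what is proved, stated in full; the proofs are below) =====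
def Claim_equal_parse_dumpfile_line_hsaco : Prop := ∀ (line : String), Dom_parse_dumpfile_line_hsaco line → Pre_parse_dumpfile_line_hsaco line → Spec_parse_dumpfile_line_hsaco line (parse_dumpfile_line_hsaco line)

-- ===== LEMMAS AND PROOFS =====

-- char-level form of pvParse
def pvParseC (cs : List Char) : Option Int :=
  PySem.Int.ofCharsBase? (PySem.Chars.replace cs [':'] []) 16

theorem pvParse_eq (s : String) : pvParse s = pvParseC s.toList := by
  rw [pvParse, pvParseC, show ([':'] : List Char) = ":".toList from rfl,
      show ([] : List Char) = "".toList from rfl, ← PySem.Str.toList_replace,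
      ← PySem.Int.ofStrBase?_ofList, String.ofList_toList]

-- tokens paired with their successor (tokens[i+1], none past the end)
def pvSuccs (l : List String) : List (String × Option String) :=
  l.zip (l.tail.map some ++ [none])

def pvStepS (st : Option String × Int) (p : String × Option String) : Option String × Int :=
  if p.1 != "" then
    if st.1 = none then (some p.1, st.2)
    else if p.1 = "//" then (st.1, (p.2.bind pvParse).getD st.2)
    else st
  else st

theorem pvSuccs_cons (t : String) (r : List String) :
    pvSuccs (t :: r) = (t, r.head?) :: pvSuccs r := by
  cases r <;> rfl

-- A's indexed range loop equals the successor-pairs fold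
theorem pvL1 (tokens : List String) : ∀ (n k : Nat), k + n = tokens.length →
    ∀ st : Option String × Int,
    (PySem.List.pyRange (k : Int) (PySem.List.len tokens) 1).foldl
      (fun (st : Option String × Int) i =>
        if PySem.List.pyGetD tokens i "" != "" then
          if st.1 = none then (some (PySem.List.pyGetD tokens i ""), st.2)
          else if PySem.List.pyGetD tokens i "" = "//" then (st.1, (pvHexAt tokens i).getD st.2)
          else st
        else st) st
    = (pvSuccs (tokens.drop k)).foldl pvStepS st := by
  intro n
  induction n with
  | zero =>
    intro k hk st
    have hk' : k = tokens.length := by omega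
    subst hk'
    rw [List.drop_length]
    simp [PySem.List.len, PySem.List.pyRange, pvSuccs]
  | succ n ih =>
    intro k hk st
    have hklt : k < tokens.length := by omega
    have hlt : (k : Int) < PySem.List.len tokens := by
      simp only [PySem.List.len]; exact_mod_cast hklt
    rw [PySem.List.pyRange_one_cons hlt, List.foldl_cons,
        List.drop_eq_getElem_cons hklt, pvSuccs_cons, List.foldl_cons]
    have hfirst :
        (if PySem.List.pyGetD tokens (k : Int) "" != "" then
          if st.1 = none then (some (PySem.List.pyGetD tokens (k : Int) ""), st.2)
          else if PySem.List.pyGetD tokens (k : Int) "" = "//" then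
            (st.1, (pvHexAt tokens (k : Int)).getD st.2)
          else st
        else st) = pvStepS st (tokens[k], (tokens.drop (k + 1)).head?) := by
      rw [pvStepS, PySem.List.pyGetD_ofNat tokens k "" hklt, List.head?_drop]
      rw [pvHexAt, show ((k : Int) + 1) = ((k + 1 : Nat) : Int) by push_cast; ring,
          PySem.List.pyGet?_natCast]
    rw [hfirst, show ((k : Int) + 1) = ((k + 1 : Nat) : Int) by push_cast; ring,
        ih (k + 1) (by omega)]

-- capture-flag token machine (token-level image of B's character machine)
def pvCapStep (st : Option String × Int × Bool) (t : String) : Option String × Int × Bool :=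
  match st with
  | (inst, addr, cap) =>
    let a1 := if cap then (pvParse t).getD addr else addr
    if t != "" then
      if inst = none then (some t, a1, false)
      else if t = "//" then (inst, a1, true)
      else (inst, a1, false)
    else (inst, a1, false)

-- a pending capture flag is the same as crediting the parsed next token immediately
theorem pvCapAbsorb (rest : List String) (inst : Option String) (addr : Int) :
    ((rest.foldl pvCapStep (inst, addr, true)).1, (rest.foldl pvCapStep (inst, addr, true)).2.1)
    = ((rest.foldl pvCapStep (inst, (rest.head?.bind pvParse).getD addr, false)).1,
       (rest.foldl pvCapStep (inst, (rest.head?.bind pvParse).getD addr, false)).2.1) := by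
  cases rest with
  | nil => rfl
  | cons u rs =>
    have h : pvCapStep (inst, addr, true) u = pvCapStep (inst, (pvParse u).getD addr, false) u := by
      simp [pvCapStep]
    simp [List.foldl_cons, h]

-- successor-pairs fold = capture machine (projecting away the flag)
theorem pvL2 (l : List String) : ∀ (inst : Option String) (addr : Int),
    (pvSuccs l).foldl pvStepS (inst, addr)
    = ((l.foldl pvCapStep (inst, addr, false)).1, (l.foldl pvCapStep (inst, addr, false)).2.1) := by
  induction l with
  | nil => intro inst addr; rfl
  | cons t rest ih =>
    intro inst addr
    rw [pvSuccs_cons, List.foldl_cons, List.foldl_cons]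
    by_cases he : t = ""
    · have h1 : pvStepS (inst, addr) (t, rest.head?) = (inst, addr) := by simp [pvStepS, he]
      have h2 : pvCapStep (inst, addr, false) t = (inst, addr, false) := by simp [pvCapStep, he]
      rw [h1, h2, ih]
    · by_cases hn : inst = none
      · have h1 : pvStepS (inst, addr) (t, rest.head?) = (some t, addr) := by
          simp [pvStepS, he, hn, bne]
        have h2 : pvCapStep (inst, addr, false) t = (some t, addr, false) := by
          simp [pvCapStep, he, hn, bne]
        rw [h1, h2, ih]
      · by_cases hm : t = "//"
        · have h1 : pvStepS (inst, addr) (t, rest.head?) =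
              (inst, (rest.head?.bind pvParse).getD addr) := by
            simp [pvStepS, hn, hm, bne]
          have h2 : pvCapStep (inst, addr, false) t = (inst, addr, true) := by
            simp [pvCapStep, hn, hm, bne]
          rw [h1, h2, ih, pvCapAbsorb]
        · have h1 : pvStepS (inst, addr) (t, rest.head?) = (inst, addr) := by
            simp [pvStepS, he, hn, hm, bne]
          have h2 : pvCapStep (inst, addr, false) t = (inst, addr, false) := by
            simp [pvCapStep, he, hn, hm, bne]
          rw [h1, h2, ih]

-- char-level capture machine over char-list tokens
def pvCapStepC (st : Option String × Int × Bool) (t : List Char) : Option String × Int × Bool :=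
  match st with
  | (inst, addr, cap) =>
    let a1 := if cap then (pvParseC t).getD addr else addr
    if t ≠ [] then
      if inst = none then (some (String.ofList t), a1, false)
      else if t = ['/', '/'] then (inst, a1, true)
      else (inst, a1, false)
    else (inst, a1, false)

theorem pvCapStep_eq (st : Option String × Int × Bool) (t : String) :
    pvCapStep st t = pvCapStepC st t.toList := by
  obtain ⟨inst, addr, cap⟩ := st
  have h2 : (t = "//") ↔ (t.toList = ['/', '/']) := by
    constructor
    · intro h; rw [h]; rfl
    · intro h; exact String.toList_inj.mp (by rw [h]; rfl)
  have h3 : some t = some (String.ofList t.toList) := by rw [String.ofList_toList]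
  by_cases he : t = ""
  · simp [pvCapStep, pvCapStepC, he, pvParse_eq]
  · have he' : t.toList ≠ [] := fun hn => he (String.toList_inj.mp (by rw [hn]; rfl))
    by_cases hm : t = "//"
    · simp [pvCapStep, pvCapStepC, hm, pvParse_eq, bne]
    · have hm' : t.toList ≠ ['/', '/'] := fun hn => hm (h2.mpr hn)
      simp [pvCapStep, pvCapStepC, he, he', hm, hm', pvParse_eq, h3, bne]

-- split(' ') as plain structural recursion
def pvSplit : List Char → List Char → List (List Char)
  | pre, [] => [pre]
  | pre, c :: rest => if c = ' ' then pre :: pvSplit [] rest else pvSplit (pre ++ [c]) rest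

theorem pvSplitOn_go_spec : ∀ (fuel : Nat) (l cur : List Char) (acc : List (List Char)), l.length < fuel →
    PySem.Chars.splitOn.go [' '] fuel l cur acc = acc.reverse ++ pvSplit cur.reverse l := by
  intro fuel
  induction fuel with
  | zero => intro l cur acc h; omega
  | succ fuel ih =>
    intro l cur acc h
    cases l with
    | nil => simp [PySem.Chars.splitOn.go, pvSplit]
    | cons c rest =>
      by_cases hc : c = ' '
      · have hpre : ([' '] : List Char).isPrefixOf (c :: rest) = true := by simp [hc, List.isPrefixOf]
        rw [PySem.Chars.splitOn.go, if_pos hpre]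
        simp only [List.length_cons] at h
        rw [ih _ _ _ (by simpa using Nat.lt_of_succ_lt_succ h)]
        simp [pvSplit, hc]
      · have hpre : ([' '] : List Char).isPrefixOf (c :: rest) = false := by
          simp [List.isPrefixOf]
          exact fun h => hc h.symm
        rw [PySem.Chars.splitOn.go, if_neg (by simp [hpre])]
        simp only [List.length_cons] at h
        rw [ih _ _ _ (by omega)]
        simp [pvSplit, hc]

theorem pvSplitOn_eq (cs : List Char) : PySem.Chars.splitOn cs [' '] = pvSplit [] cs := by
  rw [PySem.Chars.splitOn, pvSplitOn_go_spec (cs.length + 1) cs [] [] (by omega)]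
  rfl

-- finishing a token at a space: B's char step is the capture-machine step (cur flushed)
theorem pvCharStep_space (inst : Option String) (addr : Int) (cap : Bool) (cur : String) :
    pvCharStep (inst, addr, cap, cur) ' ' =
      ((pvCapStep (inst, addr, cap) cur).1, (pvCapStep (inst, addr, cap) cur).2.1,
       (pvCapStep (inst, addr, cap) cur).2.2, "") := by
  by_cases h1 : cur = "" <;> by_cases h2 : inst = none <;> by_cases h3 : cur = "//" <;>
    cases cap <;> simp [pvCharStep, pvCapStep, h1, h2, h3]

-- B's character machine over cs + sentinel space = capture machine over the split tokens
theorem pvL5 : ∀ (cs : List Char) (inst : Option String) (addr : Int) (cap : Bool) (cur : String),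
    (cs ++ [' ']).foldl pvCharStep (inst, addr, cap, cur)
    = (((pvSplit cur.toList cs).foldl pvCapStepC (inst, addr, cap)).1,
       ((pvSplit cur.toList cs).foldl pvCapStepC (inst, addr, cap)).2.1,
       ((pvSplit cur.toList cs).foldl pvCapStepC (inst, addr, cap)).2.2, "") := by
  intro cs
  induction cs with
  | nil =>
    intro inst addr cap cur
    simp only [List.nil_append, List.foldl_cons, List.foldl_nil, pvSplit]
    rw [show pvCapStepC (inst, addr, cap) cur.toList = pvCapStep (inst, addr, cap) cur from
      (pvCapStep_eq _ _).symm]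
    exact pvCharStep_space inst addr cap cur
  | cons ch cs ih =>
    intro inst addr cap cur
    by_cases hc : ch = ' '
    · subst hc
      have hsplit : pvSplit cur.toList (' ' :: cs) = cur.toList :: pvSplit [] cs := by
        simp [pvSplit]
      rw [List.cons_append, List.foldl_cons, pvCharStep_space, ih, hsplit, List.foldl_cons,
          show pvCapStepC (inst, addr, cap) cur.toList = pvCapStep (inst, addr, cap) cur from
            (pvCapStep_eq _ _).symm]
      simp
    · have hstep : pvCharStep (inst, addr, cap, cur) ch = (inst, addr, cap, cur.push ch) := by
        simp [pvCharStep, hc]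
      simp only [List.cons_append, List.foldl_cons, hstep, pvSplit, if_neg hc]
      rw [ih, String.toList_push]

-- ===== VERDICT (by name: the statement is the Claim_ definition above) =====
theorem parse_dumpfile_line_hsaco_spec : Claim_equal_parse_dumpfile_line_hsaco := by
  intro line _ _
  show parse_dumpfile_line_hsaco line = parse_dumpfile_line_hsaco_alt line
  unfold parse_dumpfile_line_hsaco parse_dumpfile_line_hsaco_alt
  have hinfix := PySem.Str.find_eq_neg_one_iff line "//"
  have hisin := PySem.Str.isIn_iff_infix "//" line
  have hge := PySem.Chars.neg_one_le_find line.toList "//".toList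
  by_cases h : PySem.Str.find line "//" < 0
  · have hfind : PySem.Str.find line "//" = -1 := by
      rw [PySem.Str.find_eq] at h ⊢; omega
    have hb : PySem.Str.isIn "//" line = false := by
      rcases Bool.eq_false_or_eq_true (PySem.Str.isIn "//" line) with hbb | hbb
      · exact absurd (hisin.mp hbb) (hinfix.mp hfind)
      · exact hbb
    rw [if_pos h, if_pos hb]
  · have hb : PySem.Str.isIn "//" line = true := by
      rw [hisin]
      by_contra hni
      exact h (by rw [hinfix.mpr hni]; omega)
    rw [if_neg h, if_neg (fun hc => by simp only [hc] at hb; exact Bool.false_ne_true hb)]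
    -- name the token list and relate it to pvSplit over the characters
    obtain ⟨ts, hts⟩ : ∃ ts, PySem.Str.split? line " " = some ts := by
      cases hsp : PySem.Str.split? line " " with
      | none =>
        have := PySem.Str.split?_map line " "
        rw [hsp] at this
        rw [PySem.Chars.split?] at this
        simp at this
      | some ts => exact ⟨ts, rfl⟩
    have htok : ts.map String.toList = pvSplit [] line.toList := by
      have hm := PySem.Str.split?_map line " "
      rw [hts, PySem.Chars.split?] at hm
      simp only [Option.map_some] at hm
      have : ts.map String.toList = PySem.Chars.splitOn line.toList " ".toList := by
        simpa using hm
      rw [this, show (" ".toList : List Char) = [' '] from rfl, pvSplitOn_eq]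
    simp only [hts, Option.getD_some]
    rw [show ((0 : Int)) = ((0 : Nat) : Int) from rfl,
        pvL1 ts ts.length 0 (by omega) (none, -1), List.drop_zero, pvL2]
    have hcap : ∀ i : Option String × Int × Bool,
        ts.foldl pvCapStep i = (pvSplit [] line.toList).foldl pvCapStepC i := by
      intro i
      rw [← htok, List.foldl_map]
      simp only [← pvCapStep_eq]
    rw [hcap, pvL5]
    simp
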